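-- pv_equiv track=rewrite | github.com/blillard/vsdm | vsdm/haar.py | _hs_n_to_hstr_exclusive
-- ===== SOURCE A (Python) =====
-- def _hs_subdivideAt(hstr, n, level=1):
--     out = []
--     for item in hstr:
--         if item==n:
--             out += [2**level*n + mu for mu in range(2**level)]
--         else:
--             out += [item]
--     return out
--
-- def _hs_n_to_hstr_exclusive(n_list):
--     """Returns the largest HaarString that does not exceed n_list."""
--     hstr = [1]
--     try_again = True
--     skip_me = []
--     while try_again:
--         new = hstr
--         try_again = False
--         for n in hstr:
--             if n in skip_me:
--                 continue
--             if all([m in n_list for m in [2*n, 2*n+1]]):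
--                 try_again = True
--                 new = _hs_subdivideAt(new, n, level=1)
--             else:
--                 skip_me += [n]
--         # at end of round, update 'out'
--         hstr = new
--         # loop terminates (try_again=False) once a round goes by without any further subdivisions
--     return hstr
-- ===== SOURCE B (Python) =====
-- def _hs_n_to_hstr_exclusive(n_list):
--     """Returns the largest HaarString that does not exceed n_list."""
--     s = set(n_list)
--
--     def expand(n):
--         if 2 * n in s and 2 * n + 1 in s:
--             return expand(2 * n) + expand(2 * n + 1)
--         return [n]
--
--     return expand(1)
-- ===== Notes on version B (the rewrite author's own statement) =====
-- stated objective: alternative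
-- what changed: Replaces A's repeated global rewrite rounds (rescanning the whole frontier each round, testing 2n and 2n+1 by linear scans of n_list, and rebuilding the list with _hs_subdivideAt) by one top-down recursive expansion from the root node 1 over set(n_list), emitting the leaves in order; it trades A's repeated list rebuilding for a one-off set construction.
import Mathlib
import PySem

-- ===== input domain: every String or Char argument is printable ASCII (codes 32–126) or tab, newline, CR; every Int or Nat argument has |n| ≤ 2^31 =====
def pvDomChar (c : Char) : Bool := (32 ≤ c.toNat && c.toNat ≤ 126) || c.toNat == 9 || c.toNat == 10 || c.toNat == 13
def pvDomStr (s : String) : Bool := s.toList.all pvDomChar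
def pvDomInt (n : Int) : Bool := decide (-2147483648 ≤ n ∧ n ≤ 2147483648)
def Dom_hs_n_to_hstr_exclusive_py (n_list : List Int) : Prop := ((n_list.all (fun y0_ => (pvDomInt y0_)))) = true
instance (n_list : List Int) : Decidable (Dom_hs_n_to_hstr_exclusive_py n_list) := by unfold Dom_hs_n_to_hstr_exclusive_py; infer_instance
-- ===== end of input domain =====

-- B replaces A's repeated whole-list rewriting rounds by a single top-down recursive
-- expansion from the root over set(n_list) (objective: alternative algorithm).

-- ===== PORT A =====
-- port of _hs_subdivideAt
def hsSubdivideAt (hstr : List Int) (n : Int) (level : Int) : List Int :=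
  hstr.foldl (fun out item =>
    if item = n then
      out ++ (PySem.List.pyRange 0 ((2:Int) ^ level.toNat) 1).map (fun mu => (2:Int) ^ level.toNat * n + mu)
    else out ++ [item]) []

-- the body of A's inner 'for n in hstr' loop; state = (new, try_again, skip_me)
def hsRoundStep (n_list : List Int) (st : List Int × Bool × List Int) (n : Int) :
    List Int × Bool × List Int :=
  if n ∈ st.2.2 then st
  else if [2*n, 2*n+1].all (fun m => decide (m ∈ n_list)) then
    (hsSubdivideAt st.1 n 1, true, st.2.2)
  else (st.1, st.2.1, st.2.2 ++ [n])

-- one round of A's while loop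
def hsRound (n_list : List Int) (hstr skip : List Int) : List Int × Bool × List Int :=
  hstr.foldl (hsRoundStep n_list) (hstr, false, skip)

-- A's while loop; the fuel is only a proven-sufficient bound on the number of iterations
def hsLoop (n_list : List Int) : Nat → List Int → List Int → List Int
  | 0, hstr, _ => hstr
  | fuel+1, hstr, skip =>
    let st := hsRound n_list hstr skip
    if st.2.1 then hsLoop n_list fuel st.1 st.2.2 else st.1

def hs_n_to_hstr_exclusive_py (n_list : List Int) : List Int :=
  hsLoop n_list ((n_list.foldl (fun a b => max a b) 0).toNat + 2) [1] []

-- ===== PORT B =====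
-- recursive expansion of Source B; the fuel is only a proven-sufficient recursion-depth bound
def hsExpand (s : PySem.Set Int) : Nat → Int → List Int
  | 0, n => [n]
  | fuel+1, n =>
    if 2*n ∈ s ∧ 2*n+1 ∈ s then hsExpand s fuel (2*n) ++ hsExpand s fuel (2*n+1)
    else [n]

def hs_n_to_hstr_exclusive_py_alt (n_list : List Int) : List Int :=
  hsExpand (PySem.Set.ofList n_list) ((n_list.foldl (fun a b => max a b) 0).toNat + 1) 1

-- ===== PRECONDITION & SPEC =====
def Spec_hs_n_to_hstr_exclusive_py (n_list : List Int) (out : List Int) : Prop := out = hs_n_to_hstr_exclusive_py_alt n_list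
instance (n_list : List Int) (out : List Int) : Decidable (Spec_hs_n_to_hstr_exclusive_py n_list out) := by unfold Spec_hs_n_to_hstr_exclusive_py; infer_instance

-- ===== CLAIM (what is proved, stated in full; the proofs are below) =====
def Claim_equal_hs_n_to_hstr_exclusive_py : Prop := ∀ (n_list : List Int), Dom_hs_n_to_hstr_exclusive_py n_list → Spec_hs_n_to_hstr_exclusive_py n_list (hs_n_to_hstr_exclusive_py n_list)

-- ===== LEMMAS AND PROOFS =====

-- the (static) subdivision test of node n
abbrev cI (n_list : List Int) (n : Int) : Prop := 2*n ∈ n_list ∧ 2*n+1 ∈ n_list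

-- what one round does to a single node
def stepMap (n_list : List Int) (n : Int) : List Int :=
  if cI n_list n then [2*n, 2*n+1] else [n]

-- substitution semantics of hsSubdivideAt at level 1
def subst (n : Int) (l : List Int) : List Int :=
  l.flatMap (fun item => if item = n then [2*n, 2*n+1] else [item])

-- dyadic cone: b is n or a descendant of a in the infinite binary tree
def InCone (a b : Int) : Prop := ∃ k : Nat, 2^k * a ≤ b ∧ b < 2^k * (a+1)

def ConeDisj (a b : Int) : Prop := ¬ InCone a b ∧ ¬ InCone b a

-- frontier invariant of A's hstr
def PInv (hstr : List Int) : Prop :=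
  (∀ n ∈ hstr, 1 ≤ n) ∧ hstr.Pairwise ConeDisj

def NPC (l : List Int) : Prop := ∀ a ∈ l, ∀ b ∈ l, b ≠ 2*a ∧ b ≠ 2*a+1

def listMax (n_list : List Int) : Int := n_list.foldl (fun a b => max a b) 0

def fuelF (n_list : List Int) : Nat := (listMax n_list).toNat + 1


-- ---- dyadic-cone arithmetic ----

lemma inCone_refl (a : Int) : InCone a a := ⟨0, by norm_num, by norm_num⟩

lemma inCone_two (a : Int) : InCone a (2*a) := ⟨1, by norm_num, by rw [pow_one]; omega⟩

lemma inCone_two1 (a : Int) : InCone a (2*a+1) := ⟨1, by rw [pow_one]; omega, by rw [pow_one]; omega⟩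

lemma inCone_trans {a b c : Int} (h1 : InCone a b) (h2 : InCone b c) : InCone a c := by
  obtain ⟨k, hk1, hk2⟩ := h1
  obtain ⟨j, hj1, hj2⟩ := h2
  refine ⟨k + j, ?_, ?_⟩
  · calc (2:Int)^(k+j) * a = 2^j * (2^k * a) := by ring
      _ ≤ 2^j * b := mul_le_mul_of_nonneg_left hk1 (by positivity)
      _ ≤ c := hj1
  · calc c < 2^j * (b+1) := hj2
      _ ≤ 2^j * (2^k * (a+1)) := mul_le_mul_of_nonneg_left (by omega) (by positivity)
      _ = 2^(k+j) * (a+1) := by ring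

lemma inCone_comp_aux {a b c : Int} {k j : Nat} (h : k ≤ j)
    (hk1 : 2^k * a ≤ c) (hk2 : c < 2^k * (a+1))
    (hj1 : 2^j * b ≤ c) (hj2 : c < 2^j * (b+1)) : InCone b a := by
  obtain ⟨d, rfl⟩ : ∃ d, j = k + d := ⟨j - k, by omega⟩
  refine ⟨d, ?_, ?_⟩
  · have h1 : (2:Int)^k * (2^d * b) < 2^k * (a+1) := by
      calc (2:Int)^k * (2^d * b) = 2^(k+d) * b := by ring
        _ ≤ c := hj1
        _ < 2^k * (a+1) := hk2
    have := lt_of_mul_lt_mul_left h1 (by positivity : (0:Int) ≤ 2^k)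
    omega
  · have h1 : (2:Int)^k * a < 2^k * (2^d * (b+1)) := by
      calc (2:Int)^k * a ≤ c := hk1
        _ < 2^(k+d) * (b+1) := hj2
        _ = 2^k * (2^d * (b+1)) := by ring
    exact lt_of_mul_lt_mul_left h1 (by positivity)

lemma inCone_comparable {a b c : Int} (ha : InCone a c) (hb : InCone b c) :
    InCone a b ∨ InCone b a := by
  obtain ⟨k, hk1, hk2⟩ := ha
  obtain ⟨j, hj1, hj2⟩ := hb
  rcases le_total k j with h | h
  · exact Or.inr (inCone_comp_aux h hk1 hk2 hj1 hj2)
  · exact Or.inl (inCone_comp_aux h hj1 hj2 hk1 hk2)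

lemma coneDisj_symm : Symmetric ConeDisj := fun _ _ h => ⟨h.2, h.1⟩

lemma coneDisj_ne {a b : Int} (h : ConeDisj a b) : a ≠ b := by
  rintro rfl
  exact h.1 (inCone_refl a)

lemma coneDisj_children {m m' x y : Int} (h : ConeDisj m m')
    (hx : InCone m x) (hy : InCone m' y) : ConeDisj x y := by
  constructor
  · intro hxy
    rcases inCone_comparable (inCone_trans hx hxy) hy with hc | hc
    · exact h.1 hc
    · exact h.2 hc
  · intro hyx
    rcases inCone_comparable hx (inCone_trans hy hyx) with hc | hc
    · exact h.1 hc
    · exact h.2 hc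

lemma two_le_pow {k : Nat} (hk : 1 ≤ k) : (2:Int) ≤ 2^k := by
  calc (2:Int) = 2^1 := (pow_one 2).symm
    _ ≤ 2^k := pow_le_pow_right₀ (by norm_num) hk

lemma coneDisj_sib {m : Int} (hm : 1 ≤ m) : ConeDisj (2*m) (2*m+1) := by
  constructor
  · rintro ⟨k, h1, h2⟩
    rcases Nat.eq_zero_or_pos k with rfl | hk
    · norm_num at h2
    · have h3 := two_le_pow hk
      have h4 : (0:Int) ≤ 2^k := by positivity
      nlinarith
  · rintro ⟨k, h1, h2⟩
    rcases Nat.eq_zero_or_pos k with rfl | hk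
    · norm_num at h1
    · have h3 := two_le_pow hk
      nlinarith

-- ---- max of the list ----

lemma foldl_max_init : ∀ (l : List Int) (a : Int), a ≤ l.foldl (fun x y => max x y) a
  | [], _ => le_refl _
  | b :: l, a => le_trans (le_max_left a b) (foldl_max_init l (max a b))

lemma mem_le_foldl_max : ∀ (l : List Int) (a x : Int), x ∈ l → x ≤ l.foldl (fun x y => max x y) a
  | [], _, _, h => absurd h (by simp)
  | b :: l, a, x, h => by
    rcases List.mem_cons.1 h with rfl | h'
    · exact le_trans (le_max_right a x) (foldl_max_init l (max a x))
    · exact mem_le_foldl_max l (max a b) x h'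

lemma listMax_nonneg (n_list : List Int) : 0 ≤ listMax n_list := foldl_max_init n_list 0

lemma mem_le_listMax {n_list : List Int} {x : Int} (h : x ∈ n_list) : x ≤ listMax n_list :=
  mem_le_foldl_max n_list 0 x h

lemma listMax_lt_pow (n_list : List Int) : listMax n_list < 2^(fuelF n_list) := by
  have h0 : 0 ≤ listMax n_list := listMax_nonneg n_list
  have h1 : listMax n_list = ((listMax n_list).toNat : Int) := (Int.toNat_of_nonneg h0).symm
  rw [fuelF, h1]
  have h2 : (listMax n_list).toNat < 2 ^ ((listMax n_list).toNat + 1) := by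
    calc (listMax n_list).toNat < 2 ^ (listMax n_list).toNat := Nat.lt_two_pow_self
      _ ≤ 2 ^ ((listMax n_list).toNat + 1) := Nat.pow_le_pow_right (by norm_num) (Nat.le_succ _)
  exact_mod_cast h2

-- ---- stepMap basics ----

lemma mem_stepMap_inCone {n_list : List Int} {m x : Int} (h : x ∈ stepMap n_list m) : InCone m x := by
  rw [stepMap] at h
  split_ifs at h
  · simp only [List.mem_cons, List.not_mem_nil, or_false] at h
    rcases h with rfl | rfl
    · exact inCone_two m
    · exact inCone_two1 m
  · simp only [List.mem_singleton] at h
    rw [h]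
    exact inCone_refl m

lemma mem_stepMap_pos {n_list : List Int} {m x : Int} (hm : 1 ≤ m) (h : x ∈ stepMap n_list m) :
    1 ≤ x := by
  rw [stepMap] at h
  split_ifs at h
  · simp only [List.mem_cons, List.not_mem_nil, or_false] at h
    rcases h with rfl | rfl <;> omega
  · simp only [List.mem_singleton] at h
    rw [h]
    exact hm

-- ---- generic list lemmas ----

lemma flatMap_congr' {α β : Type} (l : List α) (f g : α → List β) (h : ∀ x ∈ l, f x = g x) :
    l.flatMap f = l.flatMap g := by
  induction l with
  | nil => rfl
  | cons a l ih =>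
    simp only [List.flatMap_cons]
    rw [h a (by simp), ih (fun x hx => h x (by simp [hx]))]

lemma pairwise_flatMap {α β : Type} {R : α → α → Prop} {S : β → β → Prop} {g : α → List β} :
    ∀ (l : List α), l.Pairwise R → (∀ m ∈ l, (g m).Pairwise S) →
    (∀ m m', R m m' → ∀ x ∈ g m, ∀ y ∈ g m', S x y) → (l.flatMap g).Pairwise S
  | [], _, _, _ => by simp
  | m :: l, hp, hall, hcross => by
    simp only [List.flatMap_cons]
    rw [List.pairwise_append]
    rcases List.pairwise_cons.1 hp with ⟨hm, hl⟩
    refine ⟨hall m (by simp),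
      pairwise_flatMap l hl (fun m' hm' => hall m' (by simp [hm'])) hcross, ?_⟩
    intro x hx y hy
    rcases List.mem_flatMap.1 hy with ⟨m', hm', hy'⟩
    exact hcross m m' (hm m' hm') x hx y hy'

-- ---- the frontier invariant ----

lemma pinv_nodup {l : List Int} (h : PInv l) : l.Nodup :=
  h.2.imp (fun hc => coneDisj_ne hc)

lemma pinv_npc {l : List Int} (h : PInv l) : NPC l := by
  intro a ha b hb
  have ha1 : 1 ≤ a := h.1 a ha
  by_cases hab : a = b
  · subst hab
    constructor <;> omega
  · have hd : ConeDisj a b := List.Pairwise.forall coneDisj_symm h.2 ha hb hab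
    constructor
    · intro he; exact hd.1 (he ▸ inCone_two a)
    · intro he; exact hd.1 (he ▸ inCone_two1 a)

lemma pinv_preserved (n_list : List Int) {l : List Int} (h : PInv l) :
    PInv (l.flatMap (stepMap n_list)) := by
  constructor
  · intro x hx
    rcases List.mem_flatMap.1 hx with ⟨m, hm, hx'⟩
    exact mem_stepMap_pos (h.1 m hm) hx'
  · refine pairwise_flatMap l h.2 ?_ ?_
    · intro m hm
      have hm1 := h.1 m hm
      rw [stepMap]
      split_ifs
      · exact List.Pairwise.cons
          (fun y hy => by
            simp only [List.mem_singleton] at hy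
            subst hy
            exact coneDisj_sib hm1)
          (by simp)
      · simp
    · intro m m' hR x hx y hy
      exact coneDisj_children hR (mem_stepMap_inCone hx) (mem_stepMap_inCone hy)

-- ---- hsSubdivideAt is substitution ----

lemma subdivideAt_eq (l : List Int) (n : Int) : hsSubdivideAt l n 1 = subst n l := by
  have hfun : (fun (out : List Int) (item : Int) =>
      if item = n then
        out ++ (PySem.List.pyRange 0 ((2:Int) ^ (1:Int).toNat) 1).map (fun mu => (2:Int) ^ (1:Int).toNat * n + mu)
      else out ++ [item])
      = fun (out : List Int) (item : Int) => out ++ (if item = n then [2*n, 2*n+1] else [item]) := by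
    funext out item
    by_cases h : item = n
    · rw [if_pos h, if_pos h]
      congr 1
      rw [show PySem.List.pyRange 0 ((2:Int) ^ (1:Int).toNat) 1 = [0, 1] from by decide]
      norm_num
    · rw [if_neg h, if_neg h]
  rw [hsSubdivideAt, hfun, PySem.List.foldl_append_eq_flatMap]
  simp [subst]

lemma subst_append (n : Int) (a b : List Int) : subst n (a ++ b) = subst n a ++ subst n b := by
  simp [subst]

lemma subst_not_mem {n : Int} : ∀ {l : List Int}, n ∉ l → subst n l = l
  | [], _ => rfl
  | x :: r, h => by
    have hx : ¬ (x = n) := fun he => h (by simp [he])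
    have hr : n ∉ r := fun hmr => h (by simp [hmr])
    simp only [subst, List.flatMap_cons, if_neg hx]
    rw [show r.flatMap (fun item => if item = n then [2*n, 2*n+1] else [item]) = subst n r from rfl,
      subst_not_mem hr]
    simp

lemma subst_cons_self (n : Int) (r : List Int) (h : n ∉ r) :
    subst n (n :: r) = [2*n, 2*n+1] ++ r := by
  simp only [subst, List.flatMap_cons]
  rw [show r.flatMap (fun item => if item = n then [2*n, 2*n+1] else [item]) = subst n r from rfl,
    subst_not_mem h]
  simp

-- ---- one round of A's while loop ----

lemma all_eq_cI {n_list : List Int} {n : Int} :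
    ([2*n, 2*n+1].all (fun m => decide (m ∈ n_list)) = true) ↔ cI n_list n := by
  simp [cI]

lemma round_go (n_list : List Int) :
    ∀ (rest done : List Int) (ta : Bool) (skip : List Int),
    (done ++ rest).Nodup → NPC (done ++ rest) → (∀ x ∈ skip, ¬ cI n_list x) →
    ∃ skip', (∀ x ∈ skip', ¬ cI n_list x) ∧
      rest.foldl (hsRoundStep n_list) (done.flatMap (stepMap n_list) ++ rest, ta, skip)
        = ((done ++ rest).flatMap (stepMap n_list),
           ta || rest.any (fun n => decide (cI n_list n)), skip')
  | [], done, ta, skip, _, _, hskip => ⟨skip, hskip, by simp⟩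
  | n :: rest, done, ta, skip, hnd, hnpc, hskip => by
    have hshift : done ++ n :: rest = (done ++ [n]) ++ rest := by simp
    have hnd' : ((done ++ [n]) ++ rest).Nodup := by rwa [hshift] at hnd
    have hnpc' : NPC ((done ++ [n]) ++ rest) := by rwa [hshift] at hnpc
    obtain ⟨hd1, hd2, hdisj⟩ := List.nodup_append.1 hnd
    have hnotrest : n ∉ rest := (List.nodup_cons.1 hd2).1
    have hnotdone : n ∉ done := fun hc => hdisj n hc n (by simp) rfl
    by_cases hmem : n ∈ skip
    · have hcn : ¬ cI n_list n := hskip n hmem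
      have hstep : hsRoundStep n_list (done.flatMap (stepMap n_list) ++ n :: rest, ta, skip) n
          = (done.flatMap (stepMap n_list) ++ n :: rest, ta, skip) := by
        simp [hsRoundStep, hmem]
      have hrw : done.flatMap (stepMap n_list) ++ n :: rest
          = (done ++ [n]).flatMap (stepMap n_list) ++ rest := by
        have hfm : (done ++ [n]).flatMap (stepMap n_list)
            = done.flatMap (stepMap n_list) ++ [n] := by
          simp only [List.flatMap_append, List.flatMap_cons, List.flatMap_nil,
            List.append_nil, stepMap]
          rw [if_neg hcn]
        rw [hfm]
        simp
      obtain ⟨skip', h1, h2⟩ := round_go n_list rest (done ++ [n]) ta skip hnd' hnpc' hskip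
      refine ⟨skip', h1, ?_⟩
      rw [List.foldl_cons, hstep, hrw, h2, hshift]
      have hdec : (decide (2*n ∈ n_list) && decide (2*n+1 ∈ n_list)) = false := by
        have h' : decide (2*n ∈ n_list ∧ 2*n+1 ∈ n_list) = false := decide_eq_false hcn
        simpa using h'
      simp [hdec]
    · by_cases hcn : cI n_list n
      · have hnotL : n ∉ done.flatMap (stepMap n_list) := by
          intro hmemL
          rcases List.mem_flatMap.1 hmemL with ⟨m, hm, hx⟩
          have hmfull : m ∈ done ++ n :: rest := by simp [hm]
          have hnfull : n ∈ done ++ n :: rest := by simp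
          have hnp := hnpc m hmfull n hnfull
          rw [stepMap] at hx
          split_ifs at hx with hcm
          · simp only [List.mem_cons, List.not_mem_nil, or_false] at hx
            rcases hx with h | h
            · exact hnp.1 h
            · exact hnp.2 h
          · simp only [List.mem_singleton] at hx
            subst hx
            exact hnotdone hm
        have hball : [2*n, 2*n+1].all (fun m => decide (m ∈ n_list)) = true := all_eq_cI.2 hcn
        have hstep : hsRoundStep n_list (done.flatMap (stepMap n_list) ++ n :: rest, ta, skip) n
            = (subst n (done.flatMap (stepMap n_list) ++ n :: rest), true, skip) := by
          simp only [hsRoundStep, if_neg hmem, hball, if_true]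
          rw [subdivideAt_eq]
        have hsub : subst n (done.flatMap (stepMap n_list) ++ n :: rest)
            = (done ++ [n]).flatMap (stepMap n_list) ++ rest := by
          have hfm : (done ++ [n]).flatMap (stepMap n_list)
              = done.flatMap (stepMap n_list) ++ [2*n, 2*n+1] := by
            simp only [List.flatMap_append, List.flatMap_cons, List.flatMap_nil,
              List.append_nil, stepMap]
            rw [if_pos hcn]
          rw [subst_append, subst_not_mem hnotL, subst_cons_self n rest hnotrest, hfm]
          simp
        obtain ⟨skip', h1, h2⟩ := round_go n_list rest (done ++ [n]) true skip hnd' hnpc' hskip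
        refine ⟨skip', h1, ?_⟩
        rw [List.foldl_cons, hstep, hsub, h2, hshift]
        have hdec : (decide (2*n ∈ n_list) && decide (2*n+1 ∈ n_list)) = true := by
          have h' : decide (2*n ∈ n_list ∧ 2*n+1 ∈ n_list) = true := decide_eq_true hcn
          simpa using h'
        simp [hdec]
      · have hball : ¬ ([2*n, 2*n+1].all (fun m => decide (m ∈ n_list)) = true) :=
          fun hb => hcn (all_eq_cI.1 hb)
        have hstep : hsRoundStep n_list (done.flatMap (stepMap n_list) ++ n :: rest, ta, skip) n
            = (done.flatMap (stepMap n_list) ++ n :: rest, ta, skip ++ [n]) := by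
          simp only [hsRoundStep, if_neg hmem, if_neg hball]
        have hskip2 : ∀ x ∈ skip ++ [n], ¬ cI n_list x := by
          intro x hx
          rcases List.mem_append.1 hx with hx | hx
          · exact hskip x hx
          · simp only [List.mem_singleton] at hx
            subst hx
            exact hcn
        have hrw : done.flatMap (stepMap n_list) ++ n :: rest
            = (done ++ [n]).flatMap (stepMap n_list) ++ rest := by
          have hfm : (done ++ [n]).flatMap (stepMap n_list)
              = done.flatMap (stepMap n_list) ++ [n] := by
            simp only [List.flatMap_append, List.flatMap_cons, List.flatMap_nil,
              List.append_nil, stepMap]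
            rw [if_neg hcn]
          rw [hfm]
          simp
        obtain ⟨skip', h1, h2⟩ := round_go n_list rest (done ++ [n]) ta (skip ++ [n]) hnd' hnpc' hskip2
        refine ⟨skip', h1, ?_⟩
        rw [List.foldl_cons, hstep, hrw, h2, hshift]
        have hdec : (decide (2*n ∈ n_list) && decide (2*n+1 ∈ n_list)) = false := by
          have h' : decide (2*n ∈ n_list ∧ 2*n+1 ∈ n_list) = false := decide_eq_false hcn
          simpa using h'
        simp [hdec]

lemma hsRound_eq (n_list : List Int) {hstr skip : List Int} (hP : PInv hstr)
    (hs : ∀ x ∈ skip, ¬ cI n_list x) :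
    ∃ skip', (∀ x ∈ skip', ¬ cI n_list x) ∧
      hsRound n_list hstr skip
        = (hstr.flatMap (stepMap n_list), hstr.any (fun n => decide (cI n_list n)), skip') := by
  obtain ⟨skip', h1, h2⟩ := round_go n_list hstr [] false skip (by simpa using pinv_nodup hP)
    (by simpa [NPC] using pinv_npc hP) hs
  exact ⟨skip', h1, by simpa [hsRound] using h2⟩

-- ---- B's expansion ----

lemma expand_not_c {n_list : List Int} {n : Int} (h : ¬ cI n_list n) :
    ∀ f, hsExpand (PySem.Set.ofList n_list) f n = [n]
  | 0 => rfl
  | f+1 => by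
    have hc : ¬ (2*n ∈ PySem.Set.ofList n_list ∧ 2*n+1 ∈ PySem.Set.ofList n_list) := by
      simpa [PySem.Set.mem_ofList] using h
    rw [hsExpand, if_neg hc]

lemma expand_succ {n_list : List Int} :
    ∀ (f : Nat) (n : Int), 1 ≤ n → listMax n_list < 2^f * n →
    hsExpand (PySem.Set.ofList n_list) (f+1) n = hsExpand (PySem.Set.ofList n_list) f n
  | 0, n, h1, h2 => by
    have hnc : ¬ cI n_list n := by
      rintro ⟨ha, _⟩
      have h3 := mem_le_listMax ha
      norm_num at h2
      omega
    rw [expand_not_c hnc, expand_not_c hnc]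
  | f+1, n, h1, h2 => by
    by_cases hc : cI n_list n
    · have hcs : (2*n ∈ PySem.Set.ofList n_list ∧ 2*n+1 ∈ PySem.Set.ofList n_list) := by
        simpa [PySem.Set.mem_ofList] using hc
      have hb1 : listMax n_list < 2^f * (2*n) := by
        calc listMax n_list < 2^(f+1) * n := h2
          _ = 2^f * (2*n) := by ring
      have hb2 : listMax n_list < 2^f * (2*n+1) := by
        have hp : (0:Int) ≤ 2^f := by positivity
        nlinarith
      rw [show hsExpand (PySem.Set.ofList n_list) (f+1+1) n
            = hsExpand (PySem.Set.ofList n_list) (f+1) (2*n)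
              ++ hsExpand (PySem.Set.ofList n_list) (f+1) (2*n+1) from by
          rw [hsExpand, if_pos hcs],
        show hsExpand (PySem.Set.ofList n_list) (f+1) n
            = hsExpand (PySem.Set.ofList n_list) f (2*n)
              ++ hsExpand (PySem.Set.ofList n_list) f (2*n+1) from by
          rw [hsExpand, if_pos hcs]]
      rw [expand_succ f (2*n) (by omega) hb1, expand_succ f (2*n+1) (by omega) hb2]
    · rw [expand_not_c hc, expand_not_c hc]

lemma step_expand {n_list : List Int} {m : Int} (hm : 1 ≤ m) :
    (stepMap n_list m).flatMap (hsExpand (PySem.Set.ofList n_list) (fuelF n_list))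
      = hsExpand (PySem.Set.ofList n_list) (fuelF n_list) m := by
  by_cases hc : cI n_list m
  · have hcs : (2*m ∈ PySem.Set.ofList n_list ∧ 2*m+1 ∈ PySem.Set.ofList n_list) := by
      simpa [PySem.Set.mem_ofList] using hc
    have hM := listMax_lt_pow n_list
    have hp : (0:Int) < 2^((listMax n_list).toNat) := by positivity
    have hFeq : (2:Int)^(fuelF n_list) = 2^((listMax n_list).toNat) * 2 := by
      rw [fuelF, pow_succ]
    have hb1 : listMax n_list < 2^((listMax n_list).toNat) * (2*m) := by
      nlinarith
    have hb2 : listMax n_list < 2^((listMax n_list).toNat) * (2*m+1) := by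
      nlinarith
    rw [stepMap, if_pos hc]
    rw [show fuelF n_list = (listMax n_list).toNat + 1 from rfl]
    rw [show hsExpand (PySem.Set.ofList n_list) ((listMax n_list).toNat + 1) m
          = hsExpand (PySem.Set.ofList n_list) ((listMax n_list).toNat) (2*m)
            ++ hsExpand (PySem.Set.ofList n_list) ((listMax n_list).toNat) (2*m+1) from by
        rw [hsExpand, if_pos hcs]]
    rw [show ([2*m, 2*m+1] : List Int).flatMap (hsExpand (PySem.Set.ofList n_list) ((listMax n_list).toNat + 1))
          = hsExpand (PySem.Set.ofList n_list) ((listMax n_list).toNat + 1) (2*m)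
            ++ hsExpand (PySem.Set.ofList n_list) ((listMax n_list).toNat + 1) (2*m+1) from by simp]
    rw [expand_succ ((listMax n_list).toNat) (2*m) (by omega) hb1,
      expand_succ ((listMax n_list).toNat) (2*m+1) (by omega) hb2]
  · rw [stepMap, if_neg hc]
    simp

-- ---- the while loop computes the full expansion ----

lemma flatMap_step_no_c {n_list : List Int} {hstr : List Int}
    (h : ∀ n ∈ hstr, ¬ cI n_list n) :
    hstr.flatMap (stepMap n_list)
      = hstr.flatMap (hsExpand (PySem.Set.ofList n_list) (fuelF n_list)) := by
  refine flatMap_congr' hstr _ _ (fun n hn => ?_)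
  rw [stepMap, if_neg (h n hn), expand_not_c (h n hn)]

lemma hsLoop_succ (n_list : List Int) (fuel : Nat) (hstr skip : List Int) :
    hsLoop n_list (fuel+1) hstr skip
      = (if (hsRound n_list hstr skip).2.1 then
          hsLoop n_list fuel (hsRound n_list hstr skip).1 (hsRound n_list hstr skip).2.2
        else (hsRound n_list hstr skip).1) := rfl

lemma loop_eq (n_list : List Int) :
    ∀ (f : Nat) (hstr skip : List Int), PInv hstr → (∀ x ∈ skip, ¬ cI n_list x) →
    (∀ n ∈ hstr, cI n_list n → listMax n_list < 2^f * n) →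
    hsLoop n_list (f+1) hstr skip
      = hstr.flatMap (hsExpand (PySem.Set.ofList n_list) (fuelF n_list)) := by
  intro f
  induction f with
  | zero =>
    intro hstr skip hP hs hb
    obtain ⟨skip', hsk', heq⟩ := hsRound_eq n_list hP hs
    have hno : ∀ n ∈ hstr, ¬ cI n_list n := by
      intro n hn hcn
      have h1 := hb n hn hcn
      have h2 := mem_le_listMax hcn.1
      have h3 := hP.1 n hn
      norm_num at h1
      omega
    have hany : hstr.any (fun n => decide (cI n_list n)) = false := by
      rw [List.any_eq_false]
      intro n hn
      simpa using hno n hn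
    rw [hsLoop_succ, heq]
    simp only [hany, Bool.false_eq_true, if_false]
    exact flatMap_step_no_c hno
  | succ f ih =>
    intro hstr skip hP hs hb
    obtain ⟨skip', hsk', heq⟩ := hsRound_eq n_list hP hs
    by_cases hany : hstr.any (fun n => decide (cI n_list n)) = true
    · have hb' : ∀ x ∈ hstr.flatMap (stepMap n_list), cI n_list x →
          listMax n_list < 2^f * x := by
        intro x hx hcx
        rcases List.mem_flatMap.1 hx with ⟨m, hm, hx'⟩
        by_cases hcm : cI n_list m
        · have h1 := hb m hm hcm
          have hx2 : 2*m ≤ x := by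
            rw [stepMap, if_pos hcm] at hx'
            simp only [List.mem_cons, List.not_mem_nil, or_false] at hx'
            rcases hx' with rfl | rfl <;> omega
          have hp : (0:Int) ≤ 2^f := by positivity
          calc listMax n_list < 2^(f+1) * m := h1
            _ = 2^f * (2*m) := by ring
            _ ≤ 2^f * x := by nlinarith
        · rw [stepMap, if_neg hcm] at hx'
          simp only [List.mem_singleton] at hx'
          subst hx'
          exact absurd hcx hcm
      rw [hsLoop_succ, heq]
      simp only [hany, if_true]
      rw [ih (hstr.flatMap (stepMap n_list)) skip' (pinv_preserved n_list hP) hsk' hb']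
      rw [List.flatMap_assoc]
      exact flatMap_congr' hstr _ _ (fun m hm => step_expand (hP.1 m hm))
    · have hno : ∀ n ∈ hstr, ¬ cI n_list n := by
        intro n hn hcn
        exact hany (List.any_eq_true.2 ⟨n, hn, by simpa using hcn⟩)
      have hanyf : hstr.any (fun n => decide (cI n_list n)) = false := by
        rw [List.any_eq_false]
        intro n hn
        simpa using hno n hn
      rw [hsLoop_succ, heq]
      simp only [hanyf, Bool.false_eq_true, if_false]
      exact flatMap_step_no_c hno

-- ===== VERDICT (by name: the statement is the Claim_ definition above) =====
theorem hs_n_to_hstr_exclusive_py_spec : Claim_equal_hs_n_to_hstr_exclusive_py := by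
  intro n_list _
  show hs_n_to_hstr_exclusive_py n_list = hs_n_to_hstr_exclusive_py_alt n_list
  have hP : PInv [1] := ⟨by intro n hn; simp only [List.mem_singleton] at hn; omega, by simp⟩
  have hb : ∀ n ∈ [(1:Int)], cI n_list n → listMax n_list < 2^(fuelF n_list) * n := by
    intro n hn _
    simp only [List.mem_singleton] at hn
    subst hn
    simpa using listMax_lt_pow n_list
  have h := loop_eq n_list (fuelF n_list) [1] [] hP (by simp) hb
  rw [hs_n_to_hstr_exclusive_py,
    show (n_list.foldl (fun a b => max a b) 0).toNat + 2 = fuelF n_list + 1 from rfl, h]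
  rw [hs_n_to_hstr_exclusive_py_alt,
    show (n_list.foldl (fun a b => max a b) 0).toNat + 1 = fuelF n_list from rfl]
  simp
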